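-- pv_equiv track=rewrite | github.com/dellematti/advent2032 | day11/parte1.py | rigaConSpazi
-- ===== SOURCE A (Python) =====
-- def rigaConSpazi (riga, righeVuote):
--     tmp = 0
--     for r in righeVuote:
--         if riga > r:
--             tmp += 1
--         else :
--             break
--     return riga + tmp
-- ===== SOURCE B (Python) =====
-- def rigaConSpazi(riga, righeVuote):
--     # Right-to-left scan: `run` holds the length of the run of consecutive
--     # elements < riga seen so far (ending at the list's start); it resets to 0
--     # at every element >= riga, so after the whole reverse pass it equals the
--     # length of the leading prefix of righeVuote whose elements are < riga.
--     run = 0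
--     for r in reversed(righeVuote):
--         run = run + 1 if riga > r else 0
--     return riga + run
-- ===== Notes on version B (the rewrite author's own statement) =====
-- stated objective: alternative
-- what changed: Instead of counting forward with an early break, B makes one full right-to-left pass maintaining a run-length accumulator that resets at every element >= riga; the surviving run equals the leading prefix count.
import Mathlib
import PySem

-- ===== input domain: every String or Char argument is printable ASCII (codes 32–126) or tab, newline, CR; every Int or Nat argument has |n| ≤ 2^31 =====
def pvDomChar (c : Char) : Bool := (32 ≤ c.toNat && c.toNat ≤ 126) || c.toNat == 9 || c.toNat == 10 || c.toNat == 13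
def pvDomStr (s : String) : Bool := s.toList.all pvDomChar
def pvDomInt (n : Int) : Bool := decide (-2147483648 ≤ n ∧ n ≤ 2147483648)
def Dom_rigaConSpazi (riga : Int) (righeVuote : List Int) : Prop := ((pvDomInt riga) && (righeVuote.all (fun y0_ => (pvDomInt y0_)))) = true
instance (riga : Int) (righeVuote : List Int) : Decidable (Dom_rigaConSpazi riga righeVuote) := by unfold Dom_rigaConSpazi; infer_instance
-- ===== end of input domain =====

-- B replaces A's forward count-with-break by a full right-to-left pass with a resetting run-length accumulator (alternative traversal, same cost class).


-- ===== PORT A =====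
-- forward loop with accumulator tmp, breaking at the first r with riga <= r
def rigaConSpaziLoop (riga : Int) (rs : List Int) (tmp : Int) : Int :=
  match rs with
  | [] => tmp
  | r :: rest => if riga > r then rigaConSpaziLoop riga rest (tmp + 1) else tmp

def rigaConSpazi (riga : Int) (righeVuote : List Int) : Int :=
  riga + rigaConSpaziLoop riga righeVuote 0

-- ===== PORT B =====
-- right-to-left pass: run resets to 0 at every r >= riga, otherwise grows by 1
def rigaConSpazi_alt (riga : Int) (righeVuote : List Int) : Int :=
  riga + righeVuote.reverse.foldl (fun run r => if riga > r then run + 1 else 0) 0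

-- ===== PRECONDITION & SPEC =====
def Spec_rigaConSpazi (riga : Int) (righeVuote : List Int) (out : Int) : Prop := out = rigaConSpazi_alt riga righeVuote
instance (riga : Int) (righeVuote : List Int) (out : Int) : Decidable (Spec_rigaConSpazi riga righeVuote out) := by unfold Spec_rigaConSpazi; infer_instance

-- ===== CLAIM (what is proved, stated in full; the proofs are below) =====
def Claim_equal_rigaConSpazi : Prop := ∀ (riga : Int) (righeVuote : List Int), Dom_rigaConSpazi riga righeVuote → Spec_rigaConSpazi riga righeVuote (rigaConSpazi riga righeVuote)

-- ===== LEMMAS AND PROOFS =====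
-- the common value of both loops: the leading-prefix count, as a structural recursion
def prefixCnt (riga : Int) (rs : List Int) : Int :=
  match rs with
  | [] => 0
  | r :: rest => if riga > r then prefixCnt riga rest + 1 else 0

theorem loopA_eq (riga : Int) (rs : List Int) (tmp : Int) :
    rigaConSpaziLoop riga rs tmp = tmp + prefixCnt riga rs := by
  induction rs generalizing tmp with
  | nil => simp [rigaConSpaziLoop, prefixCnt]
  | cons r rest ih =>
    simp only [rigaConSpaziLoop, prefixCnt]
    by_cases h : riga > r
    · simp [h, ih]; omega
    · simp [h]

theorem loopB_eq (riga : Int) (rs : List Int) :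
    rs.reverse.foldl (fun run r => if riga > r then run + 1 else 0) 0 = prefixCnt riga rs := by
  rw [List.foldl_reverse]
  induction rs with
  | nil => simp [prefixCnt]
  | cons r rest ih => simp [List.foldr, prefixCnt, ih]

-- ===== VERDICT (by name: the statement is the Claim_ definition above) =====
theorem rigaConSpazi_spec : Claim_equal_rigaConSpazi := by
  intro riga righeVuote _
  unfold Spec_rigaConSpazi rigaConSpazi rigaConSpazi_alt
  rw [loopA_eq, loopB_eq]; omega
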